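-- pv_equiv track=rewrite | github.com/tarangsaluja/RIPE_DATA_ANALYSIS | AutomatedAnalysis/recalculate_DNSMON.py | iteration_separate_data
-- ===== SOURCE A (Python) =====
-- def iteration_separate_data(data, interval, start_time, end_time):
--     iterations = (end_time - start_time)//interval
--
--     #initialize dictionary with key iteration and value list of queries
--     iteration_dict = {}
--     for i in range(iterations+1):
--         iteration_dict[i] = []
--
--     #add queries to first dictionary
--     for query in data:
--         ts = query["timestamp"]
--         if ts < end_time and ts >= start_time:
--             iteration = (ts - start_time)//interval
--             iteration_dict[iteration].append(query)
--
--     return iteration_dict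
-- ===== SOURCE B (Python) =====
-- def iteration_separate_data(data, interval, start_time, end_time):
--     n = (end_time - start_time) // interval
--     pairs = []
--     i = 0
--     while i <= n:
--         sel = [q for q in data
--                if start_time <= q["timestamp"] < end_time
--                and (q["timestamp"] - start_time) // interval == i]
--         pairs.append((i, sel))
--         i += 1
--     return dict(pairs)
-- ===== Notes on version B (the rewrite author's own statement) =====
-- stated objective: alternative
-- what changed: Replaces A's stateful single pass (pre-initialize a dict of empty buckets, then append each in-window query to its bucket) by an index-driven while loop that builds the (bucket, queries) pairs one bucket at a time, each by its own scan of data, and turns the pair list into a dict at the end.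
import Mathlib
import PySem

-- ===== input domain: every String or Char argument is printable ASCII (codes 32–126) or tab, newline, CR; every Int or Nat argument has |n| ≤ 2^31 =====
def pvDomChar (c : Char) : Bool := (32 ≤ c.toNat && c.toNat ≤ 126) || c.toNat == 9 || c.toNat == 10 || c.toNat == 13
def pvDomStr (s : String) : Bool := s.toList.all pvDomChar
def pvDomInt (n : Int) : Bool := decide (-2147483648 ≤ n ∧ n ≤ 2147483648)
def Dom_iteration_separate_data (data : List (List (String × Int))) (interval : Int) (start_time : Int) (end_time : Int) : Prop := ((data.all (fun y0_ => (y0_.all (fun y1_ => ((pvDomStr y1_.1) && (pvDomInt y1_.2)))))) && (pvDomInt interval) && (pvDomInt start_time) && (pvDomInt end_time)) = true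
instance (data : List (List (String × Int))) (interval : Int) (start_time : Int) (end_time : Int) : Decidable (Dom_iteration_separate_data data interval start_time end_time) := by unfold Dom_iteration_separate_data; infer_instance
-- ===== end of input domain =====

-- B builds the (bucket, queries) pairs one bucket at a time by an index-driven loop, each bucket by its own scan of data (alternative decomposition, no mutable bucket state).


-- ===== PORT A =====
def iteration_separate_data (data : List (List (String × Int))) (interval : Int) (start_time : Int) (end_time : Int) : List (Int × List (List (String × Int))) :=
  let iterations := PySem.Int.floordiv (end_time - start_time) interval
  -- iteration_dict = {}; for i in range(iterations+1): iteration_dict[i] = []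
  let d0 : PySem.Dict Int (List (List (String × Int))) :=
    (PySem.List.pyRange 0 (iterations + 1) 1).foldl
      (fun d i => d.insert i ([] : List (List (String × Int)))) PySem.Dict.empty
  -- for query in data: ts = query["timestamp"]; if ts < end_time and ts >= start_time: ...append
  -- q["timestamp"] ported as getD with default: Pre_ guarantees the key is present (Python raises otherwise),
  -- and iteration_dict[iteration].append ported as modify: Pre_ guarantees the bucket key exists.
  let d :=
    data.foldl
      (fun d q =>
        let ts := (PySem.Dict.mk q).getD "timestamp" 0
        if ts < end_time ∧ ts ≥ start_time then
          let iteration := PySem.Int.floordiv (ts - start_time) interval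
          d.modify iteration [] (fun l => l ++ [q])
        else d) d0
  d.items

-- ===== PORT B =====
-- the body of B's while loop: one bucket index, one scan of data, then the next index with one
-- fewer iteration remaining (the loop runs (n+1).toNat times)
def pvBucketLoop (data : List (List (String × Int))) (interval : Int) (start_time : Int) (end_time : Int) : Int → Nat → List (Int × List (List (String × Int)))
  | _, 0 => []
  | i, Nat.succ remaining =>
      (i, data.filter
            (fun q =>
              let ts := (PySem.Dict.mk q).getD "timestamp" 0
              decide (start_time ≤ ts ∧ ts < end_time) &&
                (PySem.Int.floordiv (ts - start_time) interval == i)))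
        :: pvBucketLoop data interval start_time end_time (i + 1) remaining

def iteration_separate_data_alt (data : List (List (String × Int))) (interval : Int) (start_time : Int) (end_time : Int) : List (Int × List (List (String × Int))) :=
  let n := PySem.Int.floordiv (end_time - start_time) interval
  pvBucketLoop data interval start_time end_time 0 (n + 1).toNat

-- ===== PRECONDITION & SPEC =====
-- Pre_ excludes exactly the inputs where Python A raises: interval = 0 (ZeroDivisionError), a query
-- without a "timestamp" key (KeyError), and — for negative interval — a query inside the half-open
-- window [start_time, end_time), whose bucket index is then missing from the dict (KeyError).
def Pre_iteration_separate_data (data : List (List (String × Int))) (interval : Int) (start_time : Int) (end_time : Int) : Prop :=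
  interval ≠ 0 ∧ ∀ q ∈ data,
    (PySem.Dict.mk q).contains "timestamp" = true ∧
    (0 < interval ∨ (PySem.Dict.mk q).getD "timestamp" 0 < start_time ∨ end_time ≤ (PySem.Dict.mk q).getD "timestamp" 0)
instance (data : List (List (String × Int))) (interval : Int) (start_time : Int) (end_time : Int) : Decidable (Pre_iteration_separate_data data interval start_time end_time) := by unfold Pre_iteration_separate_data; infer_instance

def pvWitness_iteration_separate_data : (List (List (String × Int))) × Int × Int × Int :=
  ([[("timestamp", 5)], [("timestamp", 11)]], 2, 0, 10)

def Spec_iteration_separate_data (data : List (List (String × Int))) (interval : Int) (start_time : Int) (end_time : Int) (out : List (Int × List (List (String × Int)))) : Prop := out = iteration_separate_data_alt data interval start_time end_time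
instance (data : List (List (String × Int))) (interval : Int) (start_time : Int) (end_time : Int) (out : List (Int × List (List (String × Int)))) : Decidable (Spec_iteration_separate_data data interval start_time end_time out) := by unfold Spec_iteration_separate_data; infer_instance

-- ===== CLAIM (what is proved, stated in full; the proofs are below) =====
def Claim_equal_iteration_separate_data : Prop := ∀ (data : List (List (String × Int))) (interval : Int) (start_time : Int) (end_time : Int), Dom_iteration_separate_data data interval start_time end_time → Pre_iteration_separate_data data interval start_time end_time → Spec_iteration_separate_data data interval start_time end_time (iteration_separate_data data interval start_time end_time)

-- ===== LEMMAS AND PROOFS =====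

-- B's loop, characterised: running it from index lo for cnt steps yields the pairs (i, bucket i)
-- for i ∈ range(lo, lo+cnt).
theorem pv_bucketLoop_eq_map (data : List (List (String × Int))) (interval start_time end_time : Int)
    (cnt : Nat) (lo : Int) :
    pvBucketLoop data interval start_time end_time lo cnt
      = (PySem.List.pyRange lo (lo + cnt) 1).map
          (fun i => (i, data.filter
            (fun q =>
              let ts := (PySem.Dict.mk q).getD "timestamp" 0
              decide (start_time ≤ ts ∧ ts < end_time) &&
                (PySem.Int.floordiv (ts - start_time) interval == i)))) := by
  induction cnt generalizing lo with
  | zero => simp [pvBucketLoop, PySem.List.pyRange_one_eq_nil (le_refl lo)]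
  | succ k ih =>
    have hr : PySem.List.pyRange lo (lo + ((k + 1 : Nat) : Int)) 1
        = lo :: PySem.List.pyRange (lo + 1) (lo + 1 + (k : Int)) 1 := by
      rw [PySem.List.pyRange_one_cons (by push_cast; omega)]
      congr 1
      push_cast; ring_nf
    rw [pvBucketLoop, ih (lo + 1), hr, List.map_cons]

-- The bucketing fold, abstracted: if d's items are `keys.map (fun i => (i, g i))` and every
-- in-window query's bucket lies in `keys`, the fold appends each such query to its bucket.
theorem pv_fold_modify_items {Q : Type} (inw : Q → Prop) [DecidablePred inw] (bk : Q → Int)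
    (l : List Q) (keys : List Int) (hk : keys.Nodup) (g : Int → List Q)
    (d : PySem.Dict Int (List Q))
    (hd : d.items = keys.map (fun i => (i, g i)))
    (H : ∀ q ∈ l, inw q → bk q ∈ keys) :
    (l.foldl (fun d q => if inw q then d.modify (bk q) [] (fun v => v ++ [q]) else d) d).items
      = keys.map (fun i => (i, g i ++ l.filter (fun q => decide (inw q) && (bk q == i)))) := by
  induction l generalizing g d with
  | nil =>
    rw [List.foldl_nil, hd]
    simp
  | cons q l ih =>
    have hkeys : d.keys = keys := by
      simp only [PySem.Dict.keys, hd, List.map_map, Function.comp_def]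
      simp
    by_cases hw : inw q
    · have hmem : bk q ∈ keys := H q (by simp) hw
      have hcont : d.contains (bk q) = true := by
        rw [PySem.Dict.contains_iff_mem_keys, hkeys]; exact hmem
      have hget : d.getD (bk q) [] = g (bk q) := by
        apply PySem.Dict.getD_of_mem_items
        · rw [hd]; exact List.mem_map.mpr ⟨bk q, hmem, rfl⟩
        · rw [hkeys]; exact hk
      have hstep : (if inw q then d.modify (bk q) [] (fun v => v ++ [q]) else d)
          = d.insert (bk q) (g (bk q) ++ [q]) := by
        rw [if_pos hw, PySem.Dict.modify, hget]
      rw [List.foldl_cons, hstep,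
        ih (fun i => if i = bk q then g (bk q) ++ [q] else g i) _ ?_ ?_]
      · apply List.map_congr_left
        intro i _
        by_cases hi : i = bk q
        · subst hi
          simp [hw]
        · have : ¬ (bk q = i) := fun h => hi h.symm
          simp [hi, this]
      · rw [PySem.Dict.items_insert_of_contains _ _ hcont, hd, List.map_map]
        apply List.map_congr_left
        intro i _
        by_cases hi : i = bk q <;> simp [hi]
      · intro x hx hwx; exact H x (by simp [hx]) hwx
    · rw [List.foldl_cons, if_neg hw, ih g d hd (fun x hx => H x (by simp [hx]))]
      apply List.map_congr_left
      intro i _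
      simp [hw]

-- ===== VERDICT (by name: the statement is the Claim_ definition above) =====
theorem iteration_separate_data_spec : Claim_equal_iteration_separate_data := by
  intro data interval start_time end_time _ hpre
  obtain ⟨hiv, hq⟩ := hpre
  unfold Spec_iteration_separate_data iteration_separate_data iteration_separate_data_alt
  set iterations := PySem.Int.floordiv (end_time - start_time) interval with hit
  set keys := PySem.List.pyRange 0 (iterations + 1) 1 with hkeysdef
  -- B's loop produces exactly the pairs over keys
  have halt : pvBucketLoop data interval start_time end_time 0 (iterations + 1).toNat
      = keys.map (fun i => (i, data.filter
          (fun q =>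
            let ts := (PySem.Dict.mk q).getD "timestamp" 0
            decide (start_time ≤ ts ∧ ts < end_time) &&
              (PySem.Int.floordiv (ts - start_time) interval == i)))) := by
    rw [pv_bucketLoop_eq_map, hkeysdef]
    by_cases hpos : 0 ≤ iterations + 1
    · rw [show ((0 : Int) + ((iterations + 1).toNat : Int)) = iterations + 1 by omega]
    · rw [PySem.List.pyRange_one_eq_nil (by omega),
        PySem.List.pyRange_one_eq_nil (by omega)]
  rw [halt]
  have hd0 : ((PySem.List.pyRange 0 (iterations + 1) 1).foldl
      (fun d i => d.insert i ([] : List (List (String × Int)))) PySem.Dict.empty).items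
      = keys.map (fun i => (i, ([] : List (List (String × Int))))) := by
    have := PySem.Dict.items_foldl_insert_fresh (l := keys) (k := fun i => i)
      (v := fun _ => ([] : List (List (String × Int)))) (d := PySem.Dict.empty)
      (by intro a _; exact PySem.Dict.contains_empty a)
      (by simpa using PySem.List.nodup_pyRange_one 0 (iterations + 1))
    simpa using this
  have hmain := pv_fold_modify_items
    (inw := fun q => (PySem.Dict.mk q).getD "timestamp" 0 < end_time ∧
                     (PySem.Dict.mk q).getD "timestamp" 0 ≥ start_time)
    (bk := fun q => PySem.Int.floordiv ((PySem.Dict.mk q).getD "timestamp" 0 - start_time) interval)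
    data keys (PySem.List.nodup_pyRange_one 0 (iterations + 1))
    (fun _ => []) _ hd0 ?_
  · rw [hmain]
    apply List.map_congr_left
    intro i _
    rw [List.nil_append]
    refine congrArg _ (List.filter_congr ?_)
    intro q _
    have hiff : ((PySem.Dict.mk q).getD "timestamp" 0 < end_time ∧
        (PySem.Dict.mk q).getD "timestamp" 0 ≥ start_time) ↔
        (start_time ≤ (PySem.Dict.mk q).getD "timestamp" 0 ∧
        (PySem.Dict.mk q).getD "timestamp" 0 < end_time) :=
      ⟨fun h => ⟨h.2, h.1⟩, fun h => ⟨h.2, h.1⟩⟩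
    rw [show decide ((PySem.Dict.mk q).getD "timestamp" 0 < end_time ∧
        (PySem.Dict.mk q).getD "timestamp" 0 ≥ start_time)
      = decide (start_time ≤ (PySem.Dict.mk q).getD "timestamp" 0 ∧
        (PySem.Dict.mk q).getD "timestamp" 0 < end_time) from decide_eq_decide.mpr hiff]
  · -- every in-window query's bucket lies in range(iterations+1)
    intro q hqm hw
    dsimp only at hw ⊢
    set ts := (PySem.Dict.mk q).getD "timestamp" 0 with hts
    rcases (hq q hqm).2 with hpos | hout | hout
    · rw [hkeysdef, PySem.List.mem_pyRange_one]
      have h1 : PySem.Int.floordiv (ts - start_time) interval = (ts - start_time) / interval :=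
        PySem.Int.floordiv_eq_ediv_of_pos hpos
      have h2 : iterations = (end_time - start_time) / interval := by
        rw [hit, PySem.Int.floordiv_eq_ediv_of_pos hpos]
      constructor
      · rw [h1]; exact Int.ediv_nonneg (by omega) (le_of_lt hpos)
      · rw [h1, h2]
        have := Int.ediv_le_ediv hpos (show ts - start_time ≤ end_time - start_time by omega)
        omega
    · exact absurd hw.2 (by omega)
    · exact absurd hw.1 (by omega)
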